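-- pv_equiv track=rewrite | github.com/anod6351/CARtool | Subpart_names.py | bar_names_generator
-- ===== SOURCE A (Python) =====
-- def bar_names_generator(list_to_compress, regions):
--
-- #example input, regions = ['hej.g.1.e', 'hej.g.2.e', 'hej.g.1.e', 'h.g.1.e']
--
-- 	regions_temp_bar = []
-- 	region_name=[]
-- 	region_name_bar=[]
--
--
-- 	# compute region subpart name list
-- 	for line in regions:
-- 		l = line.split('.')
-- 		# here the third element in the region name after a '.' is taken as the subpart name
-- 		region_name.append(l[2])
--
-- 	# Add subpart names from the same combined region in a nested list
-- 	previous_region = []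
-- 	index=-1
-- 	regions.append('end.extra')
-- 	current_region = []
-- 	formated_bar_temp=[]
-- 	detailed_list_formated_bar=[]
--
--
-- 	for line in regions:
-- 		current_region = line.split('.')
-- 		current_region = current_region[0]
--
-- 		if not(previous_region ==[]):
--
-- 			if previous_region == current_region:
-- 				regions_temp_bar.append(region_name[index])
-- 				formated_bar_temp.append(list_to_compress[index])
--
-- 			else:
-- 				regions_temp_bar.append(region_name[index])
-- 				region_name_bar.append(regions_temp_bar)
-- 				formated_bar_temp.append(list_to_compress[index])
-- 				detailed_list_formated_bar.append(formated_bar_temp)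
--
-- 				regions_temp_bar=[]
-- 				formated_bar_temp=[]
--
-- 		index+=1
-- 		previous_region=current_region
-- 	regions.pop()
--
-- 	return region_name_bar, detailed_list_formated_bar
-- ===== SOURCE B (Python) =====
-- def bar_names_generator(list_to_compress, regions):
--     # Two-phase rewrite: precompute the key (field 0) and subpart name (field 2) of
--     # every region eagerly, then segment [0, n) into maximal runs of equal keys with
--     # an index scan and slice both lists per run -- no sentinel, no list mutation.
--     keys = [line.split('.')[0] for line in regions]
--     names = [line.split('.')[2] for line in regions]
--     name_groups = []
--     value_groups = []
--     i = 0
--     n = len(regions)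
--     while i < n:
--         j = i + 1
--         while j < n and keys[j] == keys[i]:
--             j += 1
--         name_groups.append(names[i:j])
--         value_groups.append(list_to_compress[i:j])
--         i = j
--     return name_groups, value_groups
-- ===== Notes on version B (the rewrite author's own statement) =====
-- stated objective: alternative
-- what changed: Replaced A's sentinel-append/lookahead single pass (mutating regions and carrying previous_region/index state) by a two-phase version: precompute keys and subpart names, then segment [0,n) into maximal equal-key runs by index scanning and slice both lists per run.
-- intended difference: When the last region's first dot-field is literally 'end', it collides with A's 'end.extra' sentinel: the equality branch fires on the sentinel step, so A never flushes the final run and silently drops the entire last group of names and values, while B returns that group; B's output is the intended grouping. — e.g. on bar_names_generator(["x", "y"], ["end.a.n1", "end.a.n2"]): A returns ([], []), B returns ([["n1", "n2"]], [["x", "y"]])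
import Mathlib
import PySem

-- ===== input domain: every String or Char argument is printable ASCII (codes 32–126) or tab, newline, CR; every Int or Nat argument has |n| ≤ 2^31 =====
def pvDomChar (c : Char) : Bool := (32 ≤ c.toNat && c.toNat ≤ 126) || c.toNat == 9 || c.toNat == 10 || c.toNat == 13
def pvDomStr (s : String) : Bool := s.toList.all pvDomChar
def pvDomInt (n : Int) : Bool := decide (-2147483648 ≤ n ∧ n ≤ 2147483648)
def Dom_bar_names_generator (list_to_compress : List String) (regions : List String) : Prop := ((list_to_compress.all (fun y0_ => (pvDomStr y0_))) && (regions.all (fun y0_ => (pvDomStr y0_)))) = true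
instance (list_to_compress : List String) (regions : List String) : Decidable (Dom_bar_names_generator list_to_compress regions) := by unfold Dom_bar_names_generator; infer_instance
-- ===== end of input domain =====

-- B replaces A's sentinel-append/lookahead pass by precomputed key/name arrays plus
-- an index scan over maximal equal-key runs (alternative decomposition, same cost).
-- A appends and then pops a sentinel on `regions` (net restored); the equivalence
-- proved here is about the return value only.

-- line.split('.')[0]  (split('.') is never empty, so [0] is exact)
def pvKey (line : String) : String := ((PySem.Str.split? line ".").getD []).getD 0 ""
-- line.split('.')[2]  (IndexError for fewer than 3 fields, excluded by Pre_; default never reached inside Pre_)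
def pvName (line : String) : String := PySem.List.pyGetD ((PySem.Str.split? line ".").getD []) 2 ""

-- ===== PORT A =====
def pvStepA (list_to_compress region_name : List String)
    (st : (List String × List (List String) × List String × List (List String) × Option String) × Int)
    (line : String) : (List String × List (List String) × List String × List (List String) × Option String) × Int :=
  let cur := pvKey line
  match st with
  | ((rtb, rnb, fbt, dlf, prev), index) =>
    match prev with
    | none => ((rtb, rnb, fbt, dlf, some cur), index + 1)
    | some p =>
      if p == cur then
        ((rtb ++ [PySem.List.pyGetD region_name index ""], rnb,
          fbt ++ [PySem.List.pyGetD list_to_compress index ""], dlf, some cur), index + 1)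
      else
        (([], rnb ++ [rtb ++ [PySem.List.pyGetD region_name index ""]],
          [], dlf ++ [fbt ++ [PySem.List.pyGetD list_to_compress index ""]], some cur), index + 1)

def bar_names_generator (list_to_compress : List String) (regions : List String) : List (List String) × List (List String) :=
  let region_name := regions.foldl (fun acc line => acc ++ [pvName line]) []
  let final := (regions ++ ["end.extra"]).foldl (pvStepA list_to_compress region_name) (([], [], [], [], none), -1)
  (final.1.2.1, final.1.2.2.2.1)

-- ===== PORT B =====
-- inner while loop: first j ≥ start with j = n or keys[j] ≠ k
def pvScan (keys : List String) (k : String) (j : Nat) : Nat :=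
  if _h : j < keys.length then
    if keys.getD j "" == k then pvScan keys k (j + 1) else j
  else j
termination_by keys.length - j

theorem pvScan_ge (keys : List String) (k : String) (j : Nat) : j ≤ pvScan keys k j := by
  unfold pvScan
  split
  · split
    · have := pvScan_ge keys k (j + 1); omega
    · omega
  · omega
termination_by keys.length - j

-- outer while loop of Source B
def pvSeg (list_to_compress names keys : List String) (n : Nat) (i : Nat) :
    List (List String) × List (List String) :=
  if _h : i < n then
    let j := pvScan keys (keys.getD i "") (i + 1)
    let rest := pvSeg list_to_compress names keys n j
    (PySem.List.slice names (some (i : Int)) (some (j : Int)) :: rest.1,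
     PySem.List.slice list_to_compress (some (i : Int)) (some (j : Int)) :: rest.2)
  else ([], [])
termination_by n - i
decreasing_by have := pvScan_ge keys (keys.getD i "") (i + 1); omega

def bar_names_generator_alt (list_to_compress : List String) (regions : List String) : List (List String) × List (List String) :=
  pvSeg list_to_compress (regions.map pvName) (regions.map pvKey) regions.length 0

-- ===== PRECONDITION & SPEC =====
-- Pre_ excludes exactly the inputs where Python A raises an IndexError:
-- a region with fewer than 3 '.'-fields, or list_to_compress shorter than regions.
def Pre_bar_names_generator (list_to_compress : List String) (regions : List String) : Prop :=
  (∀ line ∈ regions, 3 ≤ ((PySem.Str.split? line ".").getD []).length) ∧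
    regions.length ≤ list_to_compress.length
instance (list_to_compress : List String) (regions : List String) : Decidable (Pre_bar_names_generator list_to_compress regions) := by unfold Pre_bar_names_generator; infer_instance

def pvWitness_bar_names_generator : List String × List String :=
  (["1", "2", "3"], ["a.b.c", "a.b.d", "z.b.e"])

-- When the last region's first dot-field is 'end' it collides with A's 'end.extra'
-- sentinel, so A silently drops the whole final group while B returns it — the
-- intended grouping.
def D_bar_names_generator (list_to_compress : List String) (regions : List String) : Prop :=
  pvKey (regions.getLastD "") = "end"
instance (list_to_compress : List String) (regions : List String) : Decidable (D_bar_names_generator list_to_compress regions) := by unfold D_bar_names_generator; infer_instance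

def Spec_bar_names_generator (list_to_compress : List String) (regions : List String) (out : List (List String) × List (List String)) : Prop :=
  ¬ D_bar_names_generator list_to_compress regions → out = bar_names_generator_alt list_to_compress regions
instance (list_to_compress : List String) (regions : List String) (out : List (List String) × List (List String)) : Decidable (Spec_bar_names_generator list_to_compress regions out) := by unfold Spec_bar_names_generator; infer_instance

def pvDiffWitness_bar_names_generator : List String × List String :=
  (["x", "y"], ["end.a.n1", "end.a.n2"])
def pvDiffWitnessOut_bar_names_generator :
    (List (List String) × List (List String)) × (List (List String) × List (List String)) :=
  (([], []), ([["n1", "n2"]], [["x", "y"]]))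

-- ===== CLAIM (what is proved, stated in full; the proofs are below) =====
def Claim_unchanged_bar_names_generator : Prop := ∀ (list_to_compress : List String) (regions : List String), Dom_bar_names_generator list_to_compress regions → Pre_bar_names_generator list_to_compress regions → Spec_bar_names_generator list_to_compress regions (bar_names_generator list_to_compress regions)
def Claim_changed_bar_names_generator : Prop := Dom_bar_names_generator (pvDiffWitness_bar_names_generator.1) (pvDiffWitness_bar_names_generator.2) ∧ Pre_bar_names_generator (pvDiffWitness_bar_names_generator.1) (pvDiffWitness_bar_names_generator.2) ∧ D_bar_names_generator (pvDiffWitness_bar_names_generator.1) (pvDiffWitness_bar_names_generator.2) ∧ bar_names_generator (pvDiffWitness_bar_names_generator.1) (pvDiffWitness_bar_names_generator.2) = pvDiffWitnessOut_bar_names_generator.1 ∧ bar_names_generator_alt (pvDiffWitness_bar_names_generator.1) (pvDiffWitness_bar_names_generator.2) = pvDiffWitnessOut_bar_names_generator.2 ∧ pvDiffWitnessOut_bar_names_generator.1 ≠ pvDiffWitnessOut_bar_names_generator.2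
def Claim_exact_bar_names_generator : Prop := ∀ (list_to_compress : List String) (regions : List String), Dom_bar_names_generator list_to_compress regions → Pre_bar_names_generator list_to_compress regions → D_bar_names_generator list_to_compress regions → bar_names_generator list_to_compress regions ≠ bar_names_generator_alt list_to_compress regions

-- ===== LEMMAS AND PROOFS =====

-- A's loop, rephrased: the remaining triples (key, name, value), the carried previous
-- triple, the two temp lists and the two output lists.
def aRec : List (String × String × String) → String → String → String →
    List String → List String → List (List String) → List (List String) →
    List (List String) × List (List String)
  | [], k, nm, v, tn, tv, on, ov =>
      if k == "end" then (on, ov) else (on ++ [tn ++ [nm]], ov ++ [tv ++ [v]])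
  | (k', nm', v') :: cs, k, nm, v, tn, tv, on, ov =>
      if k == k' then aRec cs k' nm' v' (tn ++ [nm]) (tv ++ [v]) on ov
      else aRec cs k' nm' v' [] [] (on ++ [tn ++ [nm]]) (ov ++ [tv ++ [v]])

def pvTri (rn ltc : List String) : List String → Nat → List (String × String × String)
  | [], _ => []
  | r :: rs, m =>
      (pvKey r, PySem.List.pyGetD rn (m : Int) "", PySem.List.pyGetD ltc (m : Int) "") ::
        pvTri rn ltc rs (m + 1)

theorem pvKey_sentinel : pvKey "end.extra" = "end" := by decide

theorem rn_eq_aux (regions : List String) : ∀ acc : List String,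
    regions.foldl (fun acc line => acc ++ [pvName line]) acc = acc ++ regions.map pvName := by
  induction regions with
  | nil => simp
  | cons r rs ih => intro acc; simp only [List.foldl_cons, List.map_cons, ih]; simp

theorem rn_eq (regions : List String) :
    regions.foldl (fun acc line => acc ++ [pvName line]) [] = regions.map pvName := by
  simpa using rn_eq_aux regions []

theorem foldA (ltc rn : List String) (rs : List String) :
    ∀ (i : Nat) (k : String) (tn tv : List String) (on ov : List (List String)),
    (((rs ++ ["end.extra"]).foldl (pvStepA ltc rn) ((tn, on, tv, ov, some k), (i : Int))).1.2.1,
     ((rs ++ ["end.extra"]).foldl (pvStepA ltc rn) ((tn, on, tv, ov, some k), (i : Int))).1.2.2.2.1)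
      = aRec (pvTri rn ltc rs (i + 1)) k
          (PySem.List.pyGetD rn (i : Int) "") (PySem.List.pyGetD ltc (i : Int) "") tn tv on ov := by
  intro i k tn tv on ov
  induction rs generalizing i k tn tv on ov with
  | nil =>
    simp only [List.nil_append, List.foldl_cons, List.foldl_nil, pvStepA, pvKey_sentinel, pvTri, aRec]
    by_cases hk : (k == "end") = true
    · simp [hk]
    · simp [hk]
  | cons r rs ih =>
    simp only [List.cons_append, List.foldl_cons, pvStepA, pvTri, aRec]
    by_cases hk : (k == pvKey r) = true
    · simp only [hk, if_true]
      have hcast : ((i : Int) + 1) = ((i + 1 : Nat) : Int) := by push_cast; ring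
      rw [hcast, ih (i + 1)]
    · simp only [hk, if_false, Bool.false_eq_true]
      have hcast : ((i : Int) + 1) = ((i + 1 : Nat) : Int) := by push_cast; ring
      rw [hcast, ih (i + 1)]

theorem A_form (ltc : List String) (r : String) (rs : List String) :
    bar_names_generator ltc (r :: rs)
      = aRec (pvTri ((r :: rs).map pvName) ltc rs 1) (pvKey r)
          (PySem.List.pyGetD ((r :: rs).map pvName) (0 : Int) "")
          (PySem.List.pyGetD ltc (0 : Int) "") [] [] [] [] := by
  unfold bar_names_generator
  rw [rn_eq]
  have h := foldA ltc ((r :: rs).map pvName) rs 0 (pvKey r) [] [] [] []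
  simp only [Nat.cast_zero, Nat.zero_add] at h
  simp only [List.cons_append, List.foldl_cons, pvStepA]
  norm_num
  simpa using h

theorem seg_pos (ltc names keys : List String) (n i : Nat) (h : i < n) :
    pvSeg ltc names keys n i
      = (PySem.List.slice names (some (i : Int)) (some ((pvScan keys (keys.getD i "") (i + 1) : Nat) : Int)) ::
           (pvSeg ltc names keys n (pvScan keys (keys.getD i "") (i + 1))).1,
         PySem.List.slice ltc (some (i : Int)) (some ((pvScan keys (keys.getD i "") (i + 1) : Nat) : Int)) ::
           (pvSeg ltc names keys n (pvScan keys (keys.getD i "") (i + 1))).2) := by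
  rw [pvSeg]; simp [h]

theorem seg_neg (ltc names keys : List String) (n i : Nat) (h : ¬ i < n) :
    pvSeg ltc names keys n i = ([], []) := by
  rw [pvSeg]; simp [h]

theorem scan_out (keys : List String) (k : String) (j : Nat) (h : ¬ j < keys.length) :
    pvScan keys k j = j := by
  rw [pvScan]; simp [h]

theorem scan_stop (keys : List String) (k : String) (j : Nat) (h : j < keys.length)
    (hne : (keys.getD j "" == k) = false) : pvScan keys k j = j := by
  rw [pvScan]; simp only [dif_pos h, hne]; simp

theorem scan_step (keys : List String) (k : String) (j : Nat) (h : j < keys.length)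
    (he : (keys.getD j "" == k) = true) : pvScan keys k j = pvScan keys k (j + 1) := by
  rw [pvScan]; simp only [dif_pos h, he]; simp

theorem slice_cons {α : Type} (xs : List α) (i j : Nat) (hij : i < j) (hx : i < xs.length) :
    PySem.List.slice xs (some (i : Int)) (some (j : Int))
      = xs[i] :: PySem.List.slice xs (some ((i + 1 : Nat) : Int)) (some (j : Int)) := by
  rw [PySem.List.slice_natCast, PySem.List.slice_natCast, List.drop_eq_getElem_cons hx]
  have h1 : j - i = (j - (i + 1)) + 1 := by omega
  rw [h1, List.take_succ_cons]

theorem slice_one {α : Type} (xs : List α) (i : Nat) (hx : i < xs.length) :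
    PySem.List.slice xs (some (i : Int)) (some ((i + 1 : Nat) : Int)) = [xs[i]] := by
  rw [PySem.List.slice_natCast, List.drop_eq_getElem_cons hx]
  have h1 : i + 1 - i = 1 := by omega
  rw [h1]
  rfl

theorem getD_last (regions : List String) (i : Nat) (h : i + 1 = regions.length) :
    regions.getD i "" = regions.getLastD "" := by
  rw [List.getLastD_eq_getLast?, List.getLast?_eq_getElem?, List.getD_eq_getElem?_getD]
  have h2 : regions.length - 1 = i := by omega
  rw [h2]

theorem M (ltc regions : List String) (hpre : regions.length ≤ ltc.length)
    (hend : pvKey (regions.getLastD "") ≠ "end") :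
    ∀ (d i : Nat), regions.length ≤ d + i → i < regions.length →
    ∀ (tn tv : List String) (on ov : List (List String)),
    aRec (pvTri (regions.map pvName) ltc (regions.drop (i + 1)) (i + 1))
        (pvKey (regions.getD i "")) ((regions.map pvName).getD i "") (ltc.getD i "") tn tv on ov
      = (on ++ (tn ++ (pvSeg ltc (regions.map pvName) (regions.map pvKey) regions.length i).1.headD []) ::
             (pvSeg ltc (regions.map pvName) (regions.map pvKey) regions.length i).1.tail,
         ov ++ (tv ++ (pvSeg ltc (regions.map pvName) (regions.map pvKey) regions.length i).2.headD []) ::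
             (pvSeg ltc (regions.map pvName) (regions.map pvKey) regions.length i).2.tail) := by
  intro d
  induction d with
  | zero => intro i hd hi tn tv on ov; omega
  | succ d ih =>
    intro i hd hi tn tv on ov
    have hkslen : (regions.map pvKey).length = regions.length := by simp
    have hrnlen : (regions.map pvName).length = regions.length := by simp
    by_cases hlt : i + 1 < regions.length
    · -- not the last element
      have hdrop : regions.drop (i + 1) = regions[i + 1] :: regions.drop (i + 2) :=
        List.drop_eq_getElem_cons hlt
      rw [hdrop]
      simp only [pvTri, aRec]
      have hgi : regions.getD i "" = regions[i] := List.getD_eq_getElem regions "" hi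
      have hgi1 : regions.getD (i + 1) "" = regions[i + 1] := List.getD_eq_getElem regions "" hlt
      have hksi : (regions.map pvKey).getD i "" = pvKey regions[i] := by
        rw [List.getD_eq_getElem _ "" (by omega : i < (regions.map pvKey).length)]
        simp
      have hksi1 : (regions.map pvKey).getD (i + 1) "" = pvKey regions[i + 1] := by
        rw [List.getD_eq_getElem _ "" (by omega : i + 1 < (regions.map pvKey).length)]
        simp
      by_cases hkk : (pvKey regions[i] == pvKey regions[i + 1]) = true
      · -- same key: run continues
        have hkeq : pvKey regions[i] = pvKey regions[i + 1] := eq_of_beq hkk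
        rw [hgi]
        simp only [hkk, if_true]
        have hstep : pvScan (regions.map pvKey) ((regions.map pvKey).getD i "") (i + 1)
            = pvScan (regions.map pvKey) ((regions.map pvKey).getD (i + 1) "") (i + 2) := by
          rw [scan_step _ _ (i + 1) (by omega) (by rw [hksi1, hksi, hkeq]; exact beq_self_eq_true _)]
          rw [hksi, hkeq, ← hksi1]
        have hJge : i + 2 ≤ pvScan (regions.map pvKey) ((regions.map pvKey).getD (i + 1) "") (i + 2) :=
          pvScan_ge _ _ _
        have hih := ih (i + 1) (by omega) hlt (tn ++ [(regions.map pvName).getD i ""]) (tv ++ [ltc.getD i ""]) on ov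
        rw [hgi1] at hih
        have harg1 : PySem.List.pyGetD (regions.map pvName) ((i + 1 : Nat) : Int) ""
            = (regions.map pvName).getD (i + 1) "" := by rw [PySem.List.pyGetD_natCast]
        have harg2 : PySem.List.pyGetD ltc ((i + 1 : Nat) : Int) "" = ltc.getD (i + 1) "" := by
          rw [PySem.List.pyGetD_natCast]
        rw [harg1, harg2, hih]
        rw [seg_pos _ _ _ _ _ hi, seg_pos _ _ _ _ _ hlt, hstep]
        have hsl1 := slice_cons (regions.map pvName) i
          (pvScan (regions.map pvKey) ((regions.map pvKey).getD (i + 1) "") (i + 2)) (by omega) (by omega)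
        have hsl2 := slice_cons ltc i
          (pvScan (regions.map pvKey) ((regions.map pvKey).getD (i + 1) "") (i + 2)) (by omega) (by omega)
        rw [hsl1, hsl2]
        simp only [List.headD_cons, List.tail_cons]
        have hn1 : (regions.map pvName).getD i "" = (regions.map pvName)[i]'(by omega) :=
          List.getD_eq_getElem _ "" (by omega)
        have hv1 : ltc.getD i "" = ltc[i]'(by omega) := List.getD_eq_getElem _ "" (by omega)
        rw [hn1, hv1]
        simp [List.append_assoc]
      · -- different key: run breaks here
        rw [Bool.not_eq_true] at hkk
        have hkne : ((regions.map pvKey).getD (i + 1) "" == (regions.map pvKey).getD i "") = false := by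
          rw [hksi1, hksi, beq_eq_false_iff_ne]
          rw [beq_eq_false_iff_ne] at hkk
          exact fun hc => hkk hc.symm
        rw [hgi]
        simp only [hkk, Bool.false_eq_true, if_false]
        have hscan : pvScan (regions.map pvKey) ((regions.map pvKey).getD i "") (i + 1) = i + 1 :=
          scan_stop _ _ (i + 1) (by omega) hkne
        have hih := ih (i + 1) (by omega) hlt [] [] (on ++ [tn ++ [(regions.map pvName).getD i ""]])
          (ov ++ [tv ++ [ltc.getD i ""]])
        rw [hgi1] at hih
        have harg1 : PySem.List.pyGetD (regions.map pvName) ((i + 1 : Nat) : Int) ""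
            = (regions.map pvName).getD (i + 1) "" := by rw [PySem.List.pyGetD_natCast]
        have harg2 : PySem.List.pyGetD ltc ((i + 1 : Nat) : Int) "" = ltc.getD (i + 1) "" := by
          rw [PySem.List.pyGetD_natCast]
        rw [harg1, harg2, hih]
        rw [seg_pos _ _ _ _ _ hi, hscan, seg_pos _ _ _ _ _ hlt]
        have hsl1 := slice_one (regions.map pvName) i (by omega)
        have hsl2 := slice_one ltc i (by omega)
        rw [hsl1, hsl2]
        simp only [List.headD_cons, List.tail_cons]
        have hn1 : (regions.map pvName).getD i "" = (regions.map pvName)[i]'(by omega) :=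
          List.getD_eq_getElem _ "" (by omega)
        have hv1 : ltc.getD i "" = ltc[i]'(by omega) := List.getD_eq_getElem _ "" (by omega)
        rw [hn1, hv1]
        simp [List.append_assoc]
    · -- i is the last index
      have hin : i + 1 = regions.length := by omega
      have hdrop : regions.drop (i + 1) = [] := by rw [hin]; exact List.drop_length
      rw [hdrop]
      simp only [pvTri, aRec]
      have hkend : (pvKey (regions.getD i "") == "end") = false := by
        rw [getD_last regions i hin, beq_eq_false_iff_ne]
        exact hend
      simp only [hkend, Bool.false_eq_true, if_false]
      rw [seg_pos _ _ _ _ _ hi]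
      have hscan : pvScan (regions.map pvKey) ((regions.map pvKey).getD i "") (i + 1) = i + 1 :=
        scan_out _ _ (i + 1) (by omega)
      rw [hscan]
      rw [seg_neg _ _ _ _ (i + 1) (by omega)]
      have hsl1 := slice_one (regions.map pvName) i (by omega)
      have hsl2 := slice_one ltc i (by omega)
      rw [hsl1, hsl2]
      simp only [List.headD_cons, List.tail_cons]
      have hn1 : (regions.map pvName).getD i "" = (regions.map pvName)[i]'(by omega) :=
        List.getD_eq_getElem _ "" (by omega)
      have hv1 : ltc.getD i "" = ltc[i]'(by omega) := List.getD_eq_getElem _ "" (by omega)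
      rw [hn1, hv1]

theorem LA_end (ltc regions : List String)
    (hend : pvKey (regions.getLastD "") = "end") :
    ∀ (d i : Nat), regions.length ≤ d + i → i < regions.length →
    ∀ (nm v : String) (tn tv : List String) (on ov : List (List String)),
    (aRec (pvTri (regions.map pvName) ltc (regions.drop (i + 1)) (i + 1))
        (pvKey (regions.getD i "")) nm v tn tv on ov).1.length + 1
      = on.length + (pvSeg ltc (regions.map pvName) (regions.map pvKey) regions.length i).1.length := by
  intro d
  induction d with
  | zero => intro i hd hi nm v tn tv on ov; omega
  | succ d ih =>
    intro i hd hi nm v tn tv on ov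
    have hkslen : (regions.map pvKey).length = regions.length := by simp
    by_cases hlt : i + 1 < regions.length
    · have hdrop : regions.drop (i + 1) = regions[i + 1] :: regions.drop (i + 2) :=
        List.drop_eq_getElem_cons hlt
      rw [hdrop]
      simp only [pvTri, aRec]
      have hgi : regions.getD i "" = regions[i] := List.getD_eq_getElem regions "" hi
      have hgi1 : regions.getD (i + 1) "" = regions[i + 1] := List.getD_eq_getElem regions "" hlt
      have hksi : (regions.map pvKey).getD i "" = pvKey regions[i] := by
        rw [List.getD_eq_getElem _ "" (by omega : i < (regions.map pvKey).length)]
        simp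
      have hksi1 : (regions.map pvKey).getD (i + 1) "" = pvKey regions[i + 1] := by
        rw [List.getD_eq_getElem _ "" (by omega : i + 1 < (regions.map pvKey).length)]
        simp
      by_cases hkk : (pvKey regions[i] == pvKey regions[i + 1]) = true
      · have hkeq : pvKey regions[i] = pvKey regions[i + 1] := eq_of_beq hkk
        rw [hgi]
        simp only [hkk, if_true]
        have hstep : pvScan (regions.map pvKey) ((regions.map pvKey).getD i "") (i + 1)
            = pvScan (regions.map pvKey) ((regions.map pvKey).getD (i + 1) "") (i + 2) := by
          rw [scan_step _ _ (i + 1) (by omega) (by rw [hksi1, hksi, hkeq]; exact beq_self_eq_true _)]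
          rw [hksi, hkeq, ← hksi1]
        have hih := ih (i + 1) (by omega) hlt (PySem.List.pyGetD (regions.map pvName) ((i + 1 : Nat) : Int) "")
          (PySem.List.pyGetD ltc ((i + 1 : Nat) : Int) "") (tn ++ [nm]) (tv ++ [v]) on ov
        rw [hgi1] at hih
        rw [hih]
        rw [seg_pos _ _ _ _ _ hi, seg_pos _ _ _ _ _ hlt, hstep]
        simp
      · rw [Bool.not_eq_true] at hkk
        have hkne : ((regions.map pvKey).getD (i + 1) "" == (regions.map pvKey).getD i "") = false := by
          rw [hksi1, hksi, beq_eq_false_iff_ne]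
          rw [beq_eq_false_iff_ne] at hkk
          exact fun hc => hkk hc.symm
        rw [hgi]
        simp only [hkk, Bool.false_eq_true, if_false]
        have hscan : pvScan (regions.map pvKey) ((regions.map pvKey).getD i "") (i + 1) = i + 1 :=
          scan_stop _ _ (i + 1) (by omega) hkne
        have hih := ih (i + 1) (by omega) hlt (PySem.List.pyGetD (regions.map pvName) ((i + 1 : Nat) : Int) "")
          (PySem.List.pyGetD ltc ((i + 1 : Nat) : Int) "") [] [] (on ++ [tn ++ [nm]]) (ov ++ [tv ++ [v]])
        rw [hgi1] at hih
        rw [hih]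
        rw [seg_pos _ _ _ _ _ hi, hscan]
        simp
        omega
    · have hin : i + 1 = regions.length := by omega
      have hdrop : regions.drop (i + 1) = [] := by rw [hin]; exact List.drop_length
      rw [hdrop]
      simp only [pvTri, aRec]
      have hkend : (pvKey (regions.getD i "") == "end") = true := by
        rw [getD_last regions i hin, beq_iff_eq]
        exact hend
      simp only [hkend, if_true]
      rw [seg_pos _ _ _ _ _ hi]
      have hscan : pvScan (regions.map pvKey) ((regions.map pvKey).getD i "") (i + 1) = i + 1 :=
        scan_out _ _ (i + 1) (by omega)
      rw [hscan]
      rw [seg_neg _ _ _ _ (i + 1) (by omega)]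
      simp

-- ===== VERDICT (by name: the statement is the Claim_ definition above) =====
theorem bar_names_generator_spec : Claim_unchanged_bar_names_generator := by
  intro ltc regions _hdom hpre
  unfold Spec_bar_names_generator
  intro hnd
  unfold D_bar_names_generator at hnd
  obtain ⟨-, hlen⟩ := hpre
  cases regions with
  | nil =>
    show bar_names_generator ltc [] = bar_names_generator_alt ltc []
    unfold bar_names_generator bar_names_generator_alt
    rw [seg_neg ltc (List.map pvName []) (List.map pvKey []) (List.length ([] : List String)) 0 (by simp)]
    simp [pvStepA]
  | cons r rs =>
    show bar_names_generator ltc (r :: rs) = bar_names_generator_alt ltc (r :: rs)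
    rw [A_form]
    unfold bar_names_generator_alt
    have hM := M ltc (r :: rs) hlen hnd ((r :: rs).length) 0 (by omega) (by simp) [] [] [] []
    simp only [List.drop_succ_cons, List.drop_zero, Nat.zero_add, List.getD_cons_zero] at hM
    have e1 : PySem.List.pyGetD ((r :: rs).map pvName) (0 : Int) ""
        = ((r :: rs).map pvName).getD 0 "" := PySem.List.pyGetD_zero _ _
    have e2 : PySem.List.pyGetD ltc (0 : Int) "" = ltc.getD 0 "" := PySem.List.pyGetD_zero _ _
    rw [e1, e2]
    have e3 : ((r :: rs).map pvName).getD 0 "" = pvName r := by simp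
    rw [e3] at hM ⊢
    rw [hM]
    rw [seg_pos _ _ _ _ _ (by simp : 0 < (r :: rs).length)]
    simp

theorem bar_names_generator_changed : Claim_changed_bar_names_generator := by
  unfold Claim_changed_bar_names_generator
  refine ⟨by decide, by decide, by decide, by decide, ?_, by decide⟩
  show bar_names_generator_alt ["x", "y"] ["end.a.n1", "end.a.n2"] = ([["n1", "n2"]], [["x", "y"]])
  have hk : (["end.a.n1", "end.a.n2"].map pvKey) = ["end", "end"] := by decide
  have hn : (["end.a.n1", "end.a.n2"].map pvName) = ["n1", "n2"] := by decide
  unfold bar_names_generator_alt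
  rw [hk, hn]
  have hs2 : pvScan ["end", "end"] "end" 2 = 2 := scan_out _ _ 2 (by simp)
  have hs1 : pvScan ["end", "end"] "end" 1 = 2 := by
    rw [scan_step _ _ 1 (by simp) (by decide), hs2]
  rw [seg_pos _ _ _ _ _ (by simp : 0 < ["end.a.n1", "end.a.n2"].length)]
  have hg : (["end", "end"].getD 0 "") = "end" := by decide
  rw [hg, hs1]
  rw [seg_neg _ _ _ _ 2 (by simp)]
  decide

theorem bar_names_generator_tight : Claim_exact_bar_names_generator := by
  intro ltc regions _hdom hpre hD
  unfold D_bar_names_generator at hD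
  obtain ⟨-, hlen⟩ := hpre
  cases regions with
  | nil => exact absurd hD (by decide)
  | cons r rs =>
    intro heq
    have hL := LA_end ltc (r :: rs) hD ((r :: rs).length) 0 (by omega) (by simp)
      (PySem.List.pyGetD ((r :: rs).map pvName) (0 : Int) "")
      (PySem.List.pyGetD ltc (0 : Int) "") [] [] [] []
    simp only [List.drop_succ_cons, List.drop_zero, Nat.zero_add, List.getD_cons_zero] at hL
    rw [A_form] at heq
    unfold bar_names_generator_alt at heq
    rw [heq] at hL
    simp at hL
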